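-- pv_equiv track=rewrite | github.com/elixir-code/MENACER | menacer/board.py | standardForm
-- ===== SOURCE A (Python) =====
-- def rotateBoard90CW(board):
-- 	'''Rotate the board by 90 degrees clockwise'''
--
-- 	rotated_board = ''
--
-- 	for i in range(-3, 0):
-- 		rotated_board += board[i::-3]
--
-- 	return rotated_board
--
-- def mirrorBoardVertical(board):
-- 	'''Mirror the board about the vertical axis'''
--
-- 	mirrored_board = ''
--
-- 	for i in range(0, 9, 3):
-- 		mirrored_board += board[i:i+3][::-1]
--
-- 	return mirrored_board
--
-- def convertBoardToArray(board):
-- 	'''convert the board to an array of [-1,0,1]'''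
--
-- 	xo_to_num = {
-- 		'x': 1,
-- 		'o': -1,
-- 		'.': 0
-- 	}
--
-- 	board_array = [xo_to_num[xo] for xo in board]
-- 	return board_array
--
-- def convertArrayToBoard(board_array):
-- 	'''convert the board array to board string'''
--
-- 	num_to_xo = {
-- 		1: 'x',
-- 		-1: 'o',
-- 		0: '.'
-- 	}
--
-- 	board = ''.join(num_to_xo[num] for num in board_array)
-- 	return board
--
-- def compareBoardArrays(board_array1, board_array2):
-- 	'''compare board arrays'''
--
-- 	for xo1,xo2 in zip(board_array1, board_array2):
-- 		if xo1 < xo2: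
-- 			return -1
-- 		elif xo1 > xo2:
-- 			return 1
--
-- 	return 0
--
-- def standardForm(board):
-- 	'''convert the board to standard form'''
--
-- 	max_board_array = [-1]*9
--
-- 	for i in range(4):
--
-- 		board_array = convertBoardToArray(board)
--
-- 		if(compareBoardArrays(board_array, max_board_array) > 0):
-- 			max_board_array = board_array
--
-- 		mirrored_board = mirrorBoardVertical(board)
-- 		mirrored_board_array = convertBoardToArray(mirrored_board)
--
-- 		if(compareBoardArrays(mirrored_board_array, max_board_array) > 0):
-- 			max_board_array = mirrored_board_array
--
-- 		board = rotateBoard90CW(board)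
--
-- 	standard_board = convertArrayToBoard(max_board_array)
-- 	return standard_board
-- ===== SOURCE B (Python) =====
-- def rotateBoard90CW(board):
-- 	'''Rotate the board by 90 degrees clockwise'''
--
-- 	rotated_board = ''
--
-- 	for i in range(-3, 0):
-- 		rotated_board += board[i::-3]
--
-- 	return rotated_board
--
-- def mirrorBoardVertical(board):
-- 	'''Mirror the board about the vertical axis'''
--
-- 	mirrored_board = ''
--
-- 	for i in range(0, 9, 3):
-- 		mirrored_board += board[i:i+3][::-1]
--
-- 	return mirrored_board
--
-- def standardForm(board):
-- 	'''convert the board to standard form'''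
--
-- 	rank = {'o': 0, '.': 1, 'x': 2}
--
-- 	def prefer(challenger, champion):
-- 		'''does the challenger strictly beat the champion in prefix order?'''
-- 		for c, d in zip(challenger, champion):
-- 			if c != d:
-- 				return rank[c] > rank[d]
-- 		return False
--
-- 	def scan(b, k, champion):
-- 		'''challenge with each of the k remaining rotations and its mirror'''
-- 		if k == 0:
-- 			return champion
-- 		if prefer(b, champion):
-- 			champion = b
-- 		mirrored = mirrorBoardVertical(b)
-- 		if prefer(mirrored, champion):
-- 			champion = mirrored
-- 		return scan(rotateBoard90CW(b), k - 1, champion)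
--
-- 	return scan(board, 4, 'o' * 9)
-- ===== Notes on version B (the rewrite author's own statement) =====
-- stated objective: simpler
-- what changed: B drops the whole numeric-array layer of A (convertBoardToArray / compareBoardArrays / convertArrayToBoard): it keeps candidates as strings, replaces the three-way array comparator by a boolean strict-prefix test over a rank table, and replaces A's stateful interleaved loop by a recursive scan over the rotations that returns the champion string directly.
import Mathlib
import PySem

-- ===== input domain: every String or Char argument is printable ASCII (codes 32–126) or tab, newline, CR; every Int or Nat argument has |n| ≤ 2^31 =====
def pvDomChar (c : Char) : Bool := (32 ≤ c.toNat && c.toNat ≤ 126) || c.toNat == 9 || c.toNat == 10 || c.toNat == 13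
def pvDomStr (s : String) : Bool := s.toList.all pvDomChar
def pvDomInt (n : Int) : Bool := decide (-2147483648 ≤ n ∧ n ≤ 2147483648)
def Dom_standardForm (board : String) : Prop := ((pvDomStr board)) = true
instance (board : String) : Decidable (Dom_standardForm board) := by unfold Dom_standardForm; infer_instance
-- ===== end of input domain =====

-- B drops A's numeric-array layer: candidates stay strings, a boolean strict-prefix rank test
-- replaces the three-way array comparator, and a recursive scan replaces the stateful loop (objective: simpler).

-- ===== PORT A =====
def pvRotA (l : List Char) : List Char :=
  (PySem.List.pyRange (-3) 0 1).foldl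
    (fun acc i => acc ++ ((PySem.List.slice? l (some i) none (-3)).getD [])) []

def pvMirrorA (l : List Char) : List Char :=
  (PySem.List.pyRange 0 9 3).foldl
    (fun acc i =>
      acc ++ ((PySem.List.slice? (PySem.List.slice l (some i) (some (i + 3))) none none (-1)).getD [])) []

def pvXoToNum : PySem.Dict Char Int :=
  (((PySem.Dict.empty).insert 'x' 1).insert 'o' (-1)).insert '.' 0

-- Python raises KeyError on chars outside 'xo.'; those inputs are excluded by Pre_, the getD 0 is unreachable there
def pvToArr (l : List Char) : List Int :=
  l.map (fun c => (PySem.Dict.get? pvXoToNum c).getD 0)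

def pvNumToXo : PySem.Dict Int Char :=
  (((PySem.Dict.empty).insert 1 'x').insert (-1) 'o').insert 0 '.'

def pvFromArr (a : List Int) : List Char :=
  a.map (fun n => (PySem.Dict.get? pvNumToXo n).getD ' ')

def pvCmpGo : List (Int × Int) → Int
  | [] => 0
  | (x, y) :: t => if x < y then -1 else if x > y then 1 else pvCmpGo t

def pvCmpArr (a b : List Int) : Int := pvCmpGo (a.zip b)

def pvSfCoreA (l : List Char) : List Char :=
  let st := (PySem.List.pyRange 0 4 1).foldl
    (fun (st : List Char × List Int) _ =>
      let b := st.1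
      let maxA := st.2
      let ba := pvToArr b
      let maxA := if pvCmpArr ba maxA > 0 then ba else maxA
      let mba := pvToArr (pvMirrorA b)
      let maxA := if pvCmpArr mba maxA > 0 then mba else maxA
      (pvRotA b, maxA))
    (l, List.replicate 9 (-1))
  pvFromArr st.2

def standardForm (board : String) : String := String.ofList (pvSfCoreA board.toList)

-- ===== PORT B =====
-- B's python re-declares the same rotateBoard90CW / mirrorBoardVertical helpers verbatim;
-- its port reuses pvRotA / pvMirrorA above.
def pvRank : PySem.Dict Char Int :=
  (((PySem.Dict.empty).insert 'o' 0).insert '.' 1).insert 'x' 2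

-- prefer's loop over zip(challenger, champion); rank[c] raises KeyError outside 'xo.'
-- (excluded by Pre_), so the getD 0 there is unreachable
def pvPreferGo : List (Char × Char) → Bool
  | [] => false
  | (c, d) :: t =>
      if c ≠ d then
        decide ((PySem.Dict.get? pvRank c).getD 0 > (PySem.Dict.get? pvRank d).getD 0)
      else pvPreferGo t

def pvPrefer (challenger champion : List Char) : Bool := pvPreferGo (challenger.zip champion)

-- scan(b, k, champion): k counts 4,3,2,1,0 in the Python, ported as the Nat it is on every call
def pvScanB : List Char → Nat → List Char → List Char
  | _, 0, champion => champion
  | b, Nat.succ k, champion =>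
      let champion := if pvPrefer b champion then b else champion
      let mirrored := pvMirrorA b
      let champion := if pvPrefer mirrored champion then mirrored else champion
      pvScanB (pvRotA b) k champion

-- 'o' * 9
def standardForm_alt (board : String) : String :=
  String.ofList (pvScanB board.toList 4 (List.replicate 9 'o'))

-- ===== PRECONDITION & SPEC =====
-- Pre_ admits exactly the inputs on which the Python A returns: boards whose characters are all
-- 'x', 'o' or '.' (on any other character A raises KeyError in convertBoardToArray).
def Pre_standardForm (board : String) : Prop :=
  board.toList.all (fun c => c == 'x' || c == 'o' || c == '.') = true
instance (board : String) : Decidable (Pre_standardForm board) := by unfold Pre_standardForm; infer_instance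

def pvWitness_standardForm : String := "x...o..xo"

def Spec_standardForm (board : String) (out : String) : Prop := out = standardForm_alt board
instance (board : String) (out : String) : Decidable (Spec_standardForm board out) := by unfold Spec_standardForm; infer_instance

-- ===== CLAIM (what is proved, stated in full; the proofs are below) =====
def Claim_equal_standardForm : Prop := ∀ (board : String), Dom_standardForm board → Pre_standardForm board → Spec_standardForm board (standardForm board)

-- ===== LEMMAS AND PROOFS =====

-- ---- A-side: the interleaved loop is a running max over the 8 candidate boards ----
def pvStepA (st : List Char × List Int) (_ : Int) : List Char × List Int :=
  let b := st.1
  let maxA := st.2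
  let ba := pvToArr b
  let maxA := if pvCmpArr ba maxA > 0 then ba else maxA
  let mba := pvToArr (pvMirrorA b)
  let maxA := if pvCmpArr mba maxA > 0 then mba else maxA
  (pvRotA b, maxA)

def pvCandList : List Int → List Char → List (List Char)
  | [], _ => []
  | _ :: ks, b => b :: pvMirrorA b :: pvCandList ks (pvRotA b)

def pvRunA (cs : List (List Char)) (m : List Int) : List Int :=
  cs.foldl (fun m c => if pvCmpArr (pvToArr c) m > 0 then pvToArr c else m) m

lemma pvCandList_cons (k : Int) (ks : List Int) (b : List Char) :
    pvCandList (k :: ks) b = b :: pvMirrorA b :: pvCandList ks (pvRotA b) := rfl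

lemma pvRunA_cons (x : List Char) (xs : List (List Char)) (m : List Int) :
    pvRunA (x :: xs) m = pvRunA xs (if pvCmpArr (pvToArr x) m > 0 then pvToArr x else m) := rfl

lemma sfA_as_step (l : List Char) :
    pvSfCoreA l = pvFromArr (((PySem.List.pyRange 0 4 1).foldl pvStepA (l, List.replicate 9 (-1))).2) := rfl

lemma sfA_loop : ∀ (ks : List Int) (b : List Char) (m : List Int),
    (ks.foldl pvStepA (b, m)).2 = pvRunA (pvCandList ks b) m
  | [], _, _ => rfl
  | k :: ks, b, m => by
    rw [List.foldl_cons, pvCandList_cons, pvRunA_cons, pvRunA_cons]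
    exact sfA_loop ks (pvRotA b) _

-- ---- the transforms only rearrange characters of their input ----
def pvAllXo (l : List Char) : Prop := ∀ c ∈ l, c = 'x' ∨ c = 'o' ∨ c = '.'

lemma mem_sliceD {α : Type} {x : α} {l : List α} (a b : Option Int) (st : Int)
    (h : x ∈ (PySem.List.slice? l a b st).getD []) : x ∈ l := by
  by_cases h0 : st = 0
  · simp [PySem.List.slice?, h0] at h
  · rcases hsi : PySem.List.sliceIndices l.length a b st with ⟨s, e, stp⟩
    simp only [PySem.List.slice?, if_neg h0, hsi, Option.getD_some, List.mem_filterMap] at h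
    obtain ⟨k, _, hk⟩ := h
    exact List.mem_of_getElem? hk

lemma mem_slice {α : Type} {x : α} {l : List α} (a b : Option Int)
    (h : x ∈ PySem.List.slice l a b) : x ∈ l := by
  unfold PySem.List.slice at h
  exact List.mem_of_mem_drop (List.mem_of_mem_take h)

lemma rot_sub {x : Char} {b : List Char} (h : x ∈ pvRotA b) : x ∈ b := by
  rw [pvRotA, show PySem.List.pyRange (-3) 0 1 = [-3, -2, -1] from by decide] at h
  simp only [List.foldl_cons, List.foldl_nil, List.nil_append, List.mem_append] at h
  rcases h with (h | h) | h <;> exact mem_sliceD _ _ _ h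

lemma mir_sub {x : Char} {b : List Char} (h : x ∈ pvMirrorA b) : x ∈ b := by
  rw [pvMirrorA, show PySem.List.pyRange 0 9 3 = [0, 3, 6] from by decide] at h
  simp only [List.foldl_cons, List.foldl_nil, List.nil_append, List.mem_append] at h
  rcases h with (h | h) | h <;> exact mem_slice _ _ (mem_sliceD _ _ _ h)

lemma cand_allXo : ∀ (ks : List Int) (b : List Char), pvAllXo b →
    ∀ c ∈ pvCandList ks b, pvAllXo c
  | [], _, _ => by simp [pvCandList]
  | k :: ks, b, hb => by
      intro c hc
      rw [pvCandList_cons] at hc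
      rcases List.mem_cons.1 hc with rfl | hc
      · exact hb
      rcases List.mem_cons.1 hc with rfl | hc
      · exact fun y hy => hb y (mir_sub hy)
      · exact cand_allXo ks (pvRotA b) (fun y hy => hb y (rot_sub hy)) c hc

-- ---- B's boolean prefix test decides A's three-way comparison ----
lemma prefer_iff : ∀ (s t : List Char), pvAllXo s → pvAllXo t →
    (pvPrefer s t = true ↔ pvCmpArr (pvToArr s) (pvToArr t) > 0) := by
  intro s
  induction s with
  | nil => intro t _ _; simp [pvPrefer, pvPreferGo, pvToArr, pvCmpArr, pvCmpGo]
  | cons c s ih =>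
      intro t hs ht
      cases t with
      | nil => simp [pvPrefer, pvPreferGo, pvToArr, pvCmpArr, pvCmpGo]
      | cons d t' =>
          have hc := hs c (by simp)
          have hd := ht d (by simp)
          have IH := ih t' (fun y hy => hs y (by simp [hy])) (fun y hy => ht y (by simp [hy]))
          rcases hc with rfl | rfl | rfl <;> rcases hd with rfl | rfl | rfl <;>
            first
            | (simp [pvPrefer, pvPreferGo, pvToArr, pvCmpArr, pvCmpGo,
              show (PySem.Dict.get? pvRank 'x').getD 0 = 2 from by decide,
              show (PySem.Dict.get? pvRank 'o').getD 0 = 0 from by decide,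
              show (PySem.Dict.get? pvRank '.').getD 0 = 1 from by decide,
              show (PySem.Dict.get? pvXoToNum 'x').getD 0 = 1 from by decide,
              show (PySem.Dict.get? pvXoToNum 'o').getD 0 = -1 from by decide,
              show (PySem.Dict.get? pvXoToNum '.').getD 0 = 0 from by decide]; done)
            | simpa [pvPrefer, pvPreferGo, pvToArr, pvCmpArr, pvCmpGo,
              show (PySem.Dict.get? pvRank 'x').getD 0 = 2 from by decide,
              show (PySem.Dict.get? pvRank 'o').getD 0 = 0 from by decide,
              show (PySem.Dict.get? pvRank '.').getD 0 = 1 from by decide,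
              show (PySem.Dict.get? pvXoToNum 'x').getD 0 = 1 from by decide,
              show (PySem.Dict.get? pvXoToNum 'o').getD 0 = -1 from by decide,
              show (PySem.Dict.get? pvXoToNum '.').getD 0 = 0 from by decide] using IH

-- ---- B's recursive scan is the running-max fold over the same candidates ----
def pvFoldB (cs : List (List Char)) (ch : List Char) : List Char :=
  cs.foldl (fun ch c => if pvPrefer c ch then c else ch) ch

lemma scan_eq_fold : ∀ (ks : List Int) (b ch : List Char),
    pvScanB b ks.length ch = pvFoldB (pvCandList ks b) ch
  | [], _, _ => rfl
  | k :: ks,bb, ch => by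
      rw [pvCandList_cons]
      simp only [List.length_cons, pvScanB, pvFoldB, List.foldl_cons]
      exact scan_eq_fold ks (pvRotA bb) _

lemma foldB_allXo : ∀ (cs : List (List Char)) (ch : List Char),
    (∀ c ∈ cs, pvAllXo c) → pvAllXo ch → pvAllXo (pvFoldB cs ch)
  | [], _, _, hch => hch
  | c :: cs, ch, hcs, hch => by
      simp only [pvFoldB, List.foldl_cons]
      refine foldB_allXo cs _ (fun d hd => hcs d (by simp [hd])) ?_
      split_ifs
      · exact hcs c (by simp)
      · exact hch

lemma runA_eq_foldB : ∀ (cs : List (List Char)) (ch : List Char),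
    (∀ c ∈ cs, pvAllXo c) → pvAllXo ch →
    pvRunA cs (pvToArr ch) = pvToArr (pvFoldB cs ch)
  | [], _, _, _ => rfl
  | c :: cs, ch, hcs, hch => by
      rw [pvRunA_cons]
      simp only [pvFoldB, List.foldl_cons]
      have hb := prefer_iff c ch (hcs c (by simp)) hch
      have hsame : (if pvCmpArr (pvToArr c) (pvToArr ch) > 0 then pvToArr c else pvToArr ch)
          = pvToArr (if pvPrefer c ch then c else ch) := by
        by_cases h : pvPrefer c ch = true
        · rw [if_pos (hb.1 h), if_pos h]
        · rw [if_neg (fun hgt => h (hb.2 hgt)), if_neg h]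
      rw [hsame]
      refine runA_eq_foldB cs _ (fun d hd => hcs d (by simp [hd])) ?_
      split_ifs
      · exact hcs c (by simp)
      · exact hch

lemma from_to_id : ∀ (l : List Char), pvAllXo l → pvFromArr (pvToArr l) = l
  | [], _ => rfl
  | c :: l, h => by
      have hc := h c (by simp)
      have IH := from_to_id l (fun y hy => h y (by simp [hy]))
      simp only [pvToArr, pvFromArr, List.map_cons] at IH ⊢
      rcases hc with rfl | rfl | rfl <;> rw [IH] <;> rfl

-- ===== VERDICT (by name: the statement is the Claim_ definition above) =====
theorem standardForm_spec : Claim_equal_standardForm := by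
  intro board _ hpre
  show standardForm board = standardForm_alt board
  set l := board.toList with hldef
  have hxo : pvAllXo l := by
    intro c hc
    have := List.all_eq_true.1 hpre c hc
    simp at this
    tauto
  have hA : pvSfCoreA l = pvFromArr (pvRunA (pvCandList [0, 1, 2, 3] l) (List.replicate 9 (-1))) := by
    rw [sfA_as_step, show PySem.List.pyRange 0 4 1 = [0, 1, 2, 3] from by decide, sfA_loop]
  have hinit : List.replicate 9 (-1 : Int) = pvToArr (List.replicate 9 'o') := by decide
  have hchxo : pvAllXo (List.replicate 9 'o') := by
    intro c hc; right; left; exact (List.eq_of_mem_replicate hc)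
  have hcxo := cand_allXo [0, 1, 2, 3] l hxo
  show String.ofList (pvSfCoreA l) = _
  rw [hA, hinit, runA_eq_foldB _ _ hcxo hchxo,
    from_to_id _ (foldB_allXo _ _ hcxo hchxo)]
  unfold standardForm_alt
  rw [← hldef, show (4 : Nat) = ([0, 1, 2, 3] : List Int).length from rfl, scan_eq_fold]
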